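-- pv_equiv track=rewrite | github.com/RemiLecouillard/python_project | agents.py | get_water_cost
-- ===== SOURCE A (Python) =====
-- FORWARD = 'forward'
--
-- LEFT = 'left'
--
-- RIGHT = 'right'
--
-- def get_water_cost(path) :
-- 	cost = 0
-- 	for step in path :
-- 		if step == FORWARD:
-- 			cost += 2
-- 		if step == LEFT or step == RIGHT:
-- 			cost += 1
-- 	return cost
-- ===== SOURCE B (Python) =====
-- FORWARD = 'forward'
--
-- LEFT = 'left'
--
-- RIGHT = 'right'
--
-- def get_water_cost(path):
--     p = list(path)
--     return 2 * p.count(FORWARD) + p.count(LEFT) + p.count(RIGHT)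
-- ===== Notes on version B (the rewrite author's own statement) =====
-- stated objective: alternative
-- what changed: Replaces the single accumulating branch loop by three independent count() scans combined arithmetically (2*count(FORWARD)+count(LEFT)+count(RIGHT)).
import Mathlib
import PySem

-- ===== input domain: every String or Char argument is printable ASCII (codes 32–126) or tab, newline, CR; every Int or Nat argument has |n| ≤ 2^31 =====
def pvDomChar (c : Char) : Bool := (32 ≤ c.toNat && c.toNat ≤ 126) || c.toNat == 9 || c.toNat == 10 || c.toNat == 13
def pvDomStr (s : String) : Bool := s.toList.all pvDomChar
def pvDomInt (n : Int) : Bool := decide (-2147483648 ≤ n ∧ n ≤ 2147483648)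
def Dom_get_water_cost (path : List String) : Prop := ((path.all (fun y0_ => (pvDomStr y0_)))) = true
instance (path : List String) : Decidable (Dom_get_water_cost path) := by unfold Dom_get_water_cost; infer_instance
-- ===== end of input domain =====

-- B replaces A's single accumulating branch loop by three independent count() scans combined arithmetically (same O(n) cost, different decomposition).


-- ===== PORT A =====
def get_water_cost (path : List String) : Int :=
  path.foldl (fun cost step =>
    let cost := if step == "forward" then cost + 2 else cost
    if step == "left" || step == "right" then cost + 1 else cost) 0

-- ===== PORT B =====
def get_water_cost_alt (path : List String) : Int :=
  2 * (PySem.List.count path "forward") + PySem.List.count path "left" + PySem.List.count path "right"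

-- ===== PRECONDITION & SPEC =====
def Spec_get_water_cost (path : List String) (out : Int) : Prop := out = get_water_cost_alt path
instance (path : List String) (out : Int) : Decidable (Spec_get_water_cost path out) := by unfold Spec_get_water_cost; infer_instance

-- ===== CLAIM (what is proved, stated in full; the proofs are below) =====
def Claim_equal_get_water_cost : Prop := ∀ (path : List String), Dom_get_water_cost path → Spec_get_water_cost path (get_water_cost path)

-- ===== LEMMAS AND PROOFS =====

-- ===== VERDICT (by name: the statement is the Claim_ definition above) =====
theorem gwc_shift (path : List String) (c : Int) :
    path.foldl (fun cost step =>
      let cost := if step == "forward" then cost + 2 else cost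
      if step == "left" || step == "right" then cost + 1 else cost) c
    = c + 2 * (PySem.List.count path "forward") + PySem.List.count path "left" + PySem.List.count path "right" := by
  induction path generalizing c with
  | nil => simp [PySem.List.count]
  | cons h t ih =>
    simp only [List.foldl, PySem.List.count, List.count_cons]
    rw [ih]
    by_cases hf : h = "forward" <;> by_cases hl : h = "left" <;> by_cases hr : h = "right" <;>
      simp_all <;> ring

theorem get_water_cost_spec : Claim_equal_get_water_cost := by
  intro path _
  unfold Spec_get_water_cost get_water_cost get_water_cost_alt
  rw [gwc_shift]; ring
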